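-- pv_equiv track=rewrite | github.com/DvSM-git/Discriminative-Identifiers-for-Product-Blocking | main.py | get_true_pairs_for_subset
-- ===== SOURCE A (Python) =====
-- import itertools
-- import itertools
-- from collections import defaultdict
--
-- def get_true_pairs_for_subset(products, indices):
--     """
--     Gets the true duplicates for a given subset of products
--     """
--     subset_products = [products[i] for i in indices]
--     model_groups = defaultdict(list)
--     for local_idx, p in enumerate(subset_products):
--         model_groups[p['true_model_id']].append(local_idx)
--
--     true_pairs = set()
--     for ids in model_groups.values():
--         if len(ids) > 1:
--             for pair in itertools.combinations(sorted(ids), 2):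
--                 true_pairs.add(pair)
--     return true_pairs
-- ===== SOURCE B (Python) =====
-- def get_true_pairs_for_subset(products, indices):
--     """
--     Gets the true duplicates for a given subset of products
--     """
--     subset_products = [products[i] for i in indices]
--     mids = [p['true_model_id'] for p in subset_products]
--     pairs = []
--     for mid in dict.fromkeys(mids):
--         pos = [i for i, m in enumerate(mids) if m == mid]
--         for a in range(len(pos)):
--             for b in range(a + 1, len(pos)):
--                 pairs.append((pos[a], pos[b]))
--     return set(pairs)
-- ===== Notes on version B (the rewrite author's own statement) =====
-- stated objective: simpler
-- what changed: Replaces the defaultdict grouping plus itertools.combinations per group by iterating the distinct model ids in first-seen order, collecting each id's positions with one comprehension and emitting the index pairs with a plain double loop; no defaultdict, no itertools. Pre_ excludes only inputs where A raises: an index outside products (IndexError) or a selected product lacking the key 'true_model_id' (KeyError).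
import Mathlib
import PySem

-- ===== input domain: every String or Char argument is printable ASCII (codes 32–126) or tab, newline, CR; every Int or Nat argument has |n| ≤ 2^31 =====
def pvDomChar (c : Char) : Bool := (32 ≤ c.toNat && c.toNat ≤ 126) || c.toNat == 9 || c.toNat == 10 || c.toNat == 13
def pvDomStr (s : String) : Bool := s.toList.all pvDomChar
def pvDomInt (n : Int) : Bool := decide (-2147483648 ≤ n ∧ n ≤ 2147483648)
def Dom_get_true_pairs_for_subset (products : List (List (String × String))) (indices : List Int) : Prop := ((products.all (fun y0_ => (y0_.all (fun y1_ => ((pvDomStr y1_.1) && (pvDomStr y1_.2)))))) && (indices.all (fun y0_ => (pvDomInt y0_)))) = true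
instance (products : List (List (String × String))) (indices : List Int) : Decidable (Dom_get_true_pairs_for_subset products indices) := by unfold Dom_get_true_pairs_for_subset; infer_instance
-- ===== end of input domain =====

-- B iterates the distinct model ids in first-seen order, collects each id's positions by one
-- scan and emits the index pairs with a plain double loop (objective: simpler, no speed claim).

-- ===== PORT A =====
-- itertools.combinations(ids, 2) yields 2-tuples; PySem.List.combinations yields them as
-- 2-element lists, so each is turned into the pair (c[0], c[1]) — exact, every c has length 2.
def get_true_pairs_for_subset (products : List (List (String × String))) (indices : List Int) : List (Int × Int) :=
  let subset_products := indices.map (fun i => (PySem.List.pyGet? products i).getD [])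
  let model_groups : PySem.Dict String (List Int) :=
    (PySem.List.enumerate subset_products).foldl
      (fun d q => d.modify ((PySem.Dict.mk q.2).getD "true_model_id" "") [] (fun v => v ++ [q.1]))
      PySem.Dict.empty
  model_groups.values.foldl
    (fun s ids =>
      if 1 < ids.length then
        (PySem.List.combinations (PySem.List.sorted ids (fun x => x) false) 2).foldl
          (fun s c => PySem.Set.add s (c.getD 0 0, c.getD 1 0)) s
      else s)
    PySem.Set.empty

-- ===== PORT B =====
-- dict.fromkeys(mids) iterated = the distinct elements in first-occurrence order = PySem.List.dedup
def get_true_pairs_for_subset_alt (products : List (List (String × String))) (indices : List Int) : List (Int × Int) :=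
  let subset_products := indices.map (fun i => (PySem.List.pyGet? products i).getD [])
  let mids := subset_products.map (fun p => (PySem.Dict.mk p).getD "true_model_id" "")
  let pairs := (PySem.List.dedup mids).flatMap (fun mid =>
    let pos := (PySem.List.enumerate mids).filterMap (fun q => if q.2 = mid then some q.1 else none)
    (PySem.List.pyRange 0 (PySem.List.len pos) 1).flatMap (fun a =>
      (PySem.List.pyRange (a + 1) (PySem.List.len pos) 1).map (fun b =>
        (PySem.List.pyGetD pos a 0, PySem.List.pyGetD pos b 0))))
  PySem.Set.ofList pairs

-- ===== PRECONDITION & SPEC =====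
-- Pre_ excludes exactly the inputs where the Python raises: an index outside products
-- (IndexError) or a selected product without the key "true_model_id" (KeyError).
def Pre_get_true_pairs_for_subset (products : List (List (String × String))) (indices : List Int) : Prop :=
  ∀ i ∈ indices, PySem.Raise.InRange products.length i ∧
    (PySem.Dict.mk ((PySem.List.pyGet? products i).getD [])).contains "true_model_id" = true
instance (products : List (List (String × String))) (indices : List Int) : Decidable (Pre_get_true_pairs_for_subset products indices) := by unfold Pre_get_true_pairs_for_subset; infer_instance

def pvWitness_get_true_pairs_for_subset : (List (List (String × String))) × List Int :=
  ([[("true_model_id", "a")], [("true_model_id", "b")], [("true_model_id", "a")]], [0, 1, 2])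

def Spec_get_true_pairs_for_subset (products : List (List (String × String))) (indices : List Int) (out : List (Int × Int)) : Prop := out = get_true_pairs_for_subset_alt products indices
instance (products : List (List (String × String))) (indices : List Int) (out : List (Int × Int)) : Decidable (Spec_get_true_pairs_for_subset products indices out) := by unfold Spec_get_true_pairs_for_subset; infer_instance

-- ===== CLAIM (what is proved, stated in full; the proofs are below) =====
def Claim_equal_get_true_pairs_for_subset : Prop := ∀ (products : List (List (String × String))) (indices : List Int), Dom_get_true_pairs_for_subset products indices → Pre_get_true_pairs_for_subset products indices → Spec_get_true_pairs_for_subset products indices (get_true_pairs_for_subset products indices)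

-- ===== LEMMAS AND PROOFS =====

-- the model id read from a product (the lookup both ports perform)
def pvKey (p : List (String × String)) : String := (PySem.Dict.mk p).getD "true_model_id" ""

-- positions (local indices) at which the model id c occurs in mids
def pvPos (m : List String) (c : String) : List Int :=
  (PySem.List.pyRange 0 (m.length : Int)).filter (fun j => decide (PySem.List.pyGetD m j "" = c))

-- all ordered pairs of positions of c, in lexicographic order
def pvPairs (m : List String) (c : String) : List (Int × Int) :=
  (pvPos m c).flatMap (fun a => ((pvPos m c).filter (fun b => decide (a < b))).map (fun b => (a, b)))

-- all ordered pairs of a list, head with each later element first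
def pvSufPairs (l : List Int) : List (Int × Int) :=
  match l with
  | [] => []
  | x :: xs => xs.map (fun y => (x, y)) ++ pvSufPairs xs

lemma pv_enum_map {A B : Type} (f : A -> B) (xs : List A) (s : Int) :
    PySem.List.enumerate (xs.map f) s = (PySem.List.enumerate xs s).map (fun q => (q.1, f q.2)) := by
  induction xs generalizing s with
  | nil => simp [PySem.List.enumerate_nil]
  | cons x xs ih => simp [PySem.List.enumerate_cons, ih]

lemma pv_flatMap_congr {A B : Type} {f g : A -> List B} {l : List A}
    (h : ∀ x ∈ l, f x = g x) : l.flatMap f = l.flatMap g := by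
  induction l with
  | nil => simp
  | cons x xs ih =>
    simp only [List.flatMap_cons, h x (by simp)]
    rw [ih (fun y hy => h y (by simp [hy]))]

lemma pv_filterMap_pos (m : List String) (c : String) (l : List Int) :
    l.filterMap (fun j => if PySem.List.pyGetD m j "" = c then some j else none) =
      l.filter (fun j => decide (PySem.List.pyGetD m j "" = c)) := by
  induction l with
  | nil => simp
  | cons x xs ih => by_cases hx : PySem.List.pyGetD m x "" = c <;> simp [hx, ih]

lemma pv_foldl_update {A B : Type} [BEq A] (g : B -> List A) (L : List B) (s : PySem.Set A) :
    L.foldl (fun s x => PySem.Set.update s (g x)) s = PySem.Set.update s (L.flatMap g) := by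
  induction L generalizing s with
  | nil => simp [PySem.Set.update_nil]
  | cons x xs ih => simp [List.flatMap_cons, PySem.Set.update_append, ih]

lemma pv_comb2 (l : List Int) (h : l.Pairwise (· < ·)) :
    (PySem.List.combinations l 2).map (fun c => (c.getD 0 0, c.getD 1 0)) =
      l.flatMap (fun a => (l.filter (fun b => decide (a < b))).map (fun b => (a, b))) := by
  induction l with
  | nil => simp [PySem.List.combinations_nil_succ]
  | cons x xs ih =>
    obtain ⟨hx, hxs⟩ := List.pairwise_cons.mp h
    rw [show (2 : Nat) = 1 + 1 from rfl, PySem.List.combinations_cons_succ,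
      PySem.List.combinations_one, List.map_append, List.map_map, List.map_map,
      List.flatMap_cons, show (1 + 1 : Nat) = 2 from rfl, ih hxs]
    congr 1
    · rw [List.filter_cons]
      have hxx : decide (x < x) = false := by simp
      rw [hxx, if_neg Bool.false_ne_true,
        List.filter_eq_self.mpr (fun b hb => by simpa using hx b hb)]
      simp [Function.comp_def]
    · apply pv_flatMap_congr
      intro a ha
      have hax : decide (a < x) = false := by
        simp only [decide_eq_false_iff_not, not_lt]
        exact le_of_lt (hx a ha)
      rw [List.filter_cons, hax, if_neg Bool.false_ne_true]

-- the nested index loops of B produce exactly the suffix pairs of the position list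
lemma pv_idx_loop (l : List Int) : ∀ (pre : List Int),
    (PySem.List.pyRange (pre.length : Int) ((pre.length : Int) + (l.length : Int)) 1).flatMap
      (fun a => (PySem.List.pyRange (a + 1) ((pre.length : Int) + (l.length : Int)) 1).map
        (fun b => (PySem.List.pyGetD (pre ++ l) a 0, PySem.List.pyGetD (pre ++ l) b 0))) =
    pvSufPairs l := by
  induction l with
  | nil =>
    intro pre
    rw [PySem.List.pyRange_one_eq_nil (by simp)]
    rfl
  | cons x xs ih =>
    intro pre
    have hlen : ((x :: xs).length : Int) = (xs.length : Int) + 1 := by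
      simp
    rw [hlen, PySem.List.pyRange_one_cons (by omega), List.flatMap_cons]
    have hx0 : PySem.List.pyGetD (pre ++ x :: xs) (pre.length : Int) 0 = x := by
      rw [PySem.List.pyGetD_eq_getElem _ 0 (by exact_mod_cast Nat.zero_le _)
        (by simp)]
      simp
    have hdrop : (pre ++ x :: xs).drop (((pre.length : Int) + 1).toNat) = xs := by
      rw [show pre ++ x :: xs = (pre ++ [x]) ++ xs by simp,
        show (((pre.length : Int) + 1).toNat) = (pre ++ [x]).length by simp,
        List.drop_left]
    have hhead : (PySem.List.pyRange ((pre.length : Int) + 1) ((pre.length : Int) + ((xs.length : Int) + 1)) 1).map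
        (fun b => (PySem.List.pyGetD (pre ++ x :: xs) (pre.length : Int) 0, PySem.List.pyGetD (pre ++ x :: xs) b 0)) =
        xs.map (fun y => (x, y)) := by
      have hb : (pre.length : Int) + ((xs.length : Int) + 1) = ((pre ++ x :: xs).length : Int) := by
        simp
      rw [hb, show (fun b => (PySem.List.pyGetD (pre ++ x :: xs) (pre.length : Int) 0, PySem.List.pyGetD (pre ++ x :: xs) b 0)) =
          (fun v => (PySem.List.pyGetD (pre ++ x :: xs) (pre.length : Int) 0, v)) ∘ (fun b => PySem.List.pyGetD (pre ++ x :: xs) b 0) from rfl,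
        ← List.map_map,
        PySem.List.map_pyGetD_pyRange' (pre ++ x :: xs) 0 (show (0 : Int) ≤ (pre.length : Int) + 1 by omega),
        hdrop, hx0]
    rw [hhead, pvSufPairs]
    congr 1
    have h := ih (pre ++ [x])
    have hlen3 : ((pre ++ [x]).length : Int) = (pre.length : Int) + 1 := by
      simp
    rw [hlen3, List.append_assoc] at h
    simp only [List.singleton_append] at h
    rw [show (pre.length : Int) + ((xs.length : Int) + 1) = ((pre.length : Int) + 1) + (xs.length : Int) by ring]
    exact h

-- for a strictly increasing list the suffix pairs are exactly the filter form of pvPairs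
lemma pv_suf_pairs_filter (l : List Int) (h : l.Pairwise (· < ·)) :
    pvSufPairs l = l.flatMap (fun a => (l.filter (fun b => decide (a < b))).map (fun b => (a, b))) := by
  induction l with
  | nil => rfl
  | cons x xs ih =>
    obtain ⟨hx, hxs⟩ := List.pairwise_cons.mp h
    rw [pvSufPairs, List.flatMap_cons, ih hxs]
    congr 1
    · rw [List.filter_cons]
      have hxx : decide (x < x) = false := by simp
      rw [hxx, if_neg Bool.false_ne_true,
        List.filter_eq_self.mpr (fun b hb => by simpa using hx b hb)]
    · apply pv_flatMap_congr
      intro a ha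
      have hax : decide (a < x) = false := by
        simp only [decide_eq_false_iff_not, not_lt]
        exact le_of_lt (hx a ha)
      rw [List.filter_cons, hax, if_neg Bool.false_ne_true]

-- A's grouping dict, on the list of model ids
def pvD (m : List String) : PySem.Dict String (List Int) :=
  (PySem.List.enumerate m).foldl (fun d q => d.modify q.2 [] (fun v => v ++ [q.1])) PySem.Dict.empty

lemma pv_D_map (xs : List (List (String × String))) :
    (PySem.List.enumerate xs).foldl
      (fun d q => d.modify ((PySem.Dict.mk q.2).getD "true_model_id" "") [] (fun v => v ++ [q.1]))
      PySem.Dict.empty = pvD (xs.map pvKey) := by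
  rw [pvD, pv_enum_map, List.foldl_map]
  rfl

lemma pv_keys (m : List String) : (pvD m).keys = PySem.Set.ofList m := by
  rw [pvD,
    PySem.Dict.keys_foldl_modify_key (PySem.List.enumerate m) (fun q => q.2) []
      (fun _ q => fun v => v ++ [q.1]) PySem.Dict.empty,
    PySem.Dict.keys_empty, PySem.List.map_snd_enumerate]
  rfl

lemma pv_getD (m : List String) (c : String) : (pvD m).getD c [] = pvPos m c := by
  have h1 : pvD m = ((PySem.List.enumerate m).map (fun q => (q.2, q.1))).foldl
      (fun d p => d.modify p.1 [] (fun v => v ++ [p.2])) PySem.Dict.empty := by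
    rw [pvD, List.foldl_map]
  rw [h1, PySem.Dict.getD_foldl_modify_append, PySem.Dict.getD_empty, List.nil_append,
    List.filter_map, List.map_map, PySem.List.enumerate_eq_map_pyRange m "",
    List.filter_map, List.map_map, pvPos, PySem.List.len_eq]
  simp [Function.comp_def, Bool.beq_eq_decide_eq]

lemma pv_values (m : List String) : (pvD m).values = (PySem.Set.ofList m).map (pvPos m) := by
  have hnd : (pvD m).keys.Nodup := by rw [pv_keys]; exact PySem.Set.nodup_ofList m
  rw [PySem.Dict.values_eq_map_keys (pvD m) hnd [], pv_keys]
  exact List.map_congr_left (fun c _ => pv_getD m c)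

lemma pv_pos_pairwise (m : List String) (c : String) : (pvPos m c).Pairwise (· < ·) :=
  (PySem.List.pairwise_lt_pyRange_one 0 (m.length : Int)).filter _

lemma pv_pairfun (m : List String) (c : String) :
    (PySem.List.combinations (PySem.List.sorted (pvPos m c) (fun x => x)) 2).map
        (fun c => (c.getD 0 0, c.getD 1 0)) = pvPairs m c := by
  rw [PySem.List.sorted_eq_of_perm_of_pairwise_lt _ _ _ (List.Perm.refl _) (pv_pos_pairwise m c)]
  exact pv_comb2 _ (pv_pos_pairwise m c)

-- A's side collapses to one flat list of pairs
lemma pv_A_side (m : List String) :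
    (pvD m).values.foldl
      (fun s ids =>
        if 1 < ids.length then
          (PySem.List.combinations (PySem.List.sorted ids (fun x => x)) 2).foldl
            (fun s c => PySem.Set.add s (c.getD 0 0, c.getD 1 0)) s
        else s)
      PySem.Set.empty = PySem.Set.ofList ((PySem.Set.ofList m).flatMap (pvPairs m)) := by
  have hstep : ∀ (s : PySem.Set (Int × Int)), ∀ ids ∈ (pvD m).values,
      (if 1 < ids.length then
        (PySem.List.combinations (PySem.List.sorted ids (fun x => x)) 2).foldl
          (fun s c => PySem.Set.add s (c.getD 0 0, c.getD 1 0)) s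
      else s) =
      PySem.Set.update s ((PySem.List.combinations (PySem.List.sorted ids (fun x => x)) 2).map
        (fun c => (c.getD 0 0, c.getD 1 0))) := by
    intro s ids _
    by_cases h : 1 < ids.length
    · rw [if_pos h, PySem.Set.update_map_eq_foldl_add]
    · rw [if_neg h]
      have hl : (PySem.List.sorted ids (fun x => x)).length < 2 := by
        have := (PySem.List.sorted_perm ids (fun x => x) false).length_eq
        omega
      rw [PySem.List.combinations_eq_nil_of_length_lt _ hl, List.map_nil, PySem.Set.update_nil]
  rw [PySem.List.foldl_congr_mem _ _ _ _ hstep, pv_foldl_update, PySem.Set.update_empty,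
    pv_values, List.flatMap_map]
  exact congrArg _ (pv_flatMap_congr (fun c _ => pv_pairfun m c))

-- B's positions comprehension computes pvPos
lemma pv_B_pos (m : List String) (c : String) :
    (PySem.List.enumerate m).filterMap (fun q => if q.2 = c then some q.1 else none) = pvPos m c := by
  rw [PySem.List.enumerate_eq_map_pyRange m "", List.filterMap_map, pvPos, PySem.List.len_eq]
  simp only [Function.comp_def]
  rw [pv_filterMap_pos]

-- B's side collapses to the same flat list of pairs
lemma pv_B_side (m : List String) :
    (PySem.List.dedup m).flatMap (fun mid =>
      (PySem.List.pyRange 0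
          ((((PySem.List.enumerate m).filterMap (fun q => if q.2 = mid then some q.1 else none)).length : Int)) 1).flatMap
        (fun a =>
          (PySem.List.pyRange (a + 1)
              ((((PySem.List.enumerate m).filterMap (fun q => if q.2 = mid then some q.1 else none)).length : Int)) 1).map
            (fun b =>
              (PySem.List.pyGetD ((PySem.List.enumerate m).filterMap (fun q => if q.2 = mid then some q.1 else none)) a 0,
               PySem.List.pyGetD ((PySem.List.enumerate m).filterMap (fun q => if q.2 = mid then some q.1 else none)) b 0)))) =
    (PySem.Set.ofList m).flatMap (pvPairs m) := by
  rw [PySem.List.dedup_eq_ofList]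
  apply pv_flatMap_congr
  intro c _
  rw [pv_B_pos m c]
  have h := pv_idx_loop (pvPos m c) []
  simp only [List.length_nil, Nat.cast_zero, List.nil_append, zero_add] at h
  rw [h, pv_suf_pairs_filter _ (pv_pos_pairwise m c), pvPairs]

-- ===== VERDICT (by name: the statement is the Claim_ definition above) =====
theorem get_true_pairs_for_subset_spec : Claim_equal_get_true_pairs_for_subset := by
  intro products indices _ _
  unfold Spec_get_true_pairs_for_subset
  unfold get_true_pairs_for_subset get_true_pairs_for_subset_alt
  simp only [PySem.List.len_eq]
  rw [pv_D_map, show (fun p => (PySem.Dict.mk p).getD "true_model_id" "") = pvKey from rfl,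
    pv_A_side, pv_B_side]
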